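-- pv_equiv track=rewrite | github.com/ChangshengZhang/guojiao | szIndex.py | get_extreme_low_point
-- ===== SOURCE A (Python) =====
-- def get_extreme_low_point(price_low,compared_day):
--     extreme_low_point = []
--     extreme_low_point_index = []
--     price_low_new= []
--     low_point =[]
--     low_point_index =[]
--     buy_point =[]
--     buy_point_index =[]
--     #新数组
--     for i in range(compared_day):
--         price_low_new.append(price_low[0])
--
--     for i in range(len(price_low)):
--         price_low_new.append(price_low[i])
--
--     for i in range(compared_day):
--         price_low_new.append(price_low[len(price_low)-1])
--
--
--     for i in range(len(price_low)):
--         flag =1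
--         for j in range(compared_day*2+1):
--             if price_low_new[i+compared_day]> price_low_new[i+j]:
--                 flag = 0
--                 break
--         if flag == 1:
--             extreme_low_point_index.append(i)
--             extreme_low_point.append(price_low[i])
--
--     for i in range(len(extreme_low_point)-1):
--         flag =1
--         if i < compared_day:
--              continue
--         else:
--             for j in range(compared_day):
--                 if extreme_low_point[i-j-1]<extreme_low_point[i]:
--                     flag =1
--                     break
--                 else:
--                     flag =flag+1
--                 if flag ==compared_day+1:
--                     #反弹条件
--                     if extreme_low_point[i+1]>extreme_low_point[i]:
--                         low_point.append(extreme_low_point[i])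
--                         low_point_index.append(extreme_low_point_index[i])
--                         buy_point.append(extreme_low_point[i+1])
--                         buy_point_index.append(extreme_low_point_index[i+1])
--
--     return low_point,low_point_index,buy_point,buy_point_index
-- ===== SOURCE B (Python) =====
-- # O(n) re-implementation: fixed-size window minima answered from per-block
-- # prefix/suffix minimum arrays (block size = window size), instead of A's
-- # O(n*compared_day) rescan of every window.
--
-- def _pref_mins(a, b):
--     # pref[i] = min(a[i - i % b : i + 1])
--     res = []
--     for i in range(len(a)):
--         res.append(a[i] if i % b == 0 else min(res[-1], a[i]))
--     return res
--
--
-- def _suf_mins(a, b):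
--     # suf[i] = min(a[i : min(i - i % b + b, len(a))])
--     n = len(a)
--     res = [0] * n
--     for i in range(n - 1, -1, -1):
--         if i % b == b - 1 or i == n - 1:
--             res[i] = a[i]
--         else:
--             res[i] = min(res[i + 1], a[i])
--     return res
--
--
-- def get_extreme_low_point(price_low, compared_day):
--     n = len(price_low)
--     c = compared_day
--     if c <= 0 or n == 0:
--         return [], [], [], []
--     # pad so every window [i, i+2c] has exactly 2c+1 entries
--     pad = [price_low[0]] * c + price_low + [price_low[-1]] * c
--     w = 2 * c + 1
--     pref = _pref_mins(pad, w)
--     suf = _suf_mins(pad, w)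
--     # i is an extreme low point iff its value is <= everything within c days
--     ext_idx = [i for i in range(n)
--                if price_low[i] <= min(suf[i], pref[i + 2 * c])]
--     ext = [price_low[i] for i in ext_idx]
--     m = len(ext)
--     # rebound buy point: previous c extreme lows all >= current, next one higher
--     pref2 = _pref_mins(ext, c)
--     suf2 = _suf_mins(ext, c)
--     low, lowi, buy, buyi = [], [], [], []
--     for i in range(c, m - 1):
--         if min(suf2[i - c], pref2[i - 1]) >= ext[i] and ext[i + 1] > ext[i]:
--             low.append(ext[i])
--             lowi.append(ext_idx[i])
--             buy.append(ext[i + 1])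
--             buyi.append(ext_idx[i + 1])
--     return low, lowi, buy, buyi
-- ===== Notes on version B (the rewrite author's own statement) =====
-- stated objective: faster
-- what changed: A rescans every (2*compared_day+1)-wide window per position (and rescans the previous compared_day extremes per candidate); B pads once and precomputes blockwise prefix/suffix minima (block size = window size), answering each window-minimum test in O(1).
import Mathlib
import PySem

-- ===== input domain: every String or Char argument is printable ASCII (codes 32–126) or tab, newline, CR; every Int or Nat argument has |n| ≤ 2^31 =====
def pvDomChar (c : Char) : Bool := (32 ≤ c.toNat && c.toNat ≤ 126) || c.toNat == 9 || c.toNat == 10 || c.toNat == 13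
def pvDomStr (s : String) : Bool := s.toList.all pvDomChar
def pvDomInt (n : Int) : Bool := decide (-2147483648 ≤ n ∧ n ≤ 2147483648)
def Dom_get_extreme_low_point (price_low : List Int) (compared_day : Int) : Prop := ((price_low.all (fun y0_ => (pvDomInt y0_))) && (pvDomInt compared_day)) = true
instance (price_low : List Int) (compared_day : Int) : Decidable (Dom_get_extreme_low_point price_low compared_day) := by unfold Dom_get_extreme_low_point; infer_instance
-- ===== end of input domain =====

-- B replaces A's per-position window rescan by blockwise prefix/suffix minima
-- (block size = window size), answering each window-minimum test in O(1).

-- shared trivial indexing helper: xs[i] (every use below is in range on the admitted inputs)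
def pyg (l : List Int) (i : Int) : Int := PySem.List.pyGetD l i 0

-- same lookup on an Array (a Python list IS an array; O(1) access where pyg on List is O(i))
def pyga (a : Array Int) (i : Int) : Int :=
  if 0 ≤ i then a.getD i.toNat 0
  else if 0 ≤ i + (a.size : Int) then a.getD (i + (a.size : Int)).toNat 0 else 0

-- ===== PORT A =====
-- inner window scan of A's first phase: 'for j in ...: if new[i+c] > new[i+j]: flag=0; break'
def pvFlagLoop (nw : Array Int) (i c : Int) : List Int → Int
  | [] => 1
  | j :: js => if pyga nw (i + c) > pyga nw (i + j) then 0 else pvFlagLoop nw i c js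

-- inner loop of A's second phase (state: flag and the four output lists)
def pvInner2 (ext exti : List Int) (i c : Int) :
    List Int → Int × List Int × List Int × List Int × List Int →
    Int × List Int × List Int × List Int × List Int
  | [], st => st
  | j :: js, (flag, lp, lpi, bp, bpi) =>
    if pyg ext (i - j - 1) < pyg ext i then (1, lp, lpi, bp, bpi)
    else
      let flag' := flag + 1
      let st' := if flag' = c + 1 ∧ pyg ext (i + 1) > pyg ext i then
          (flag', lp ++ [pyg ext i], lpi ++ [pyg exti i],
           bp ++ [pyg ext (i + 1)], bpi ++ [pyg exti (i + 1)])
        else (flag', lp, lpi, bp, bpi)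
      pvInner2 ext exti i c js st'

-- A's first three loops: price_low_new (pad with first/last value, compared_day times)
def pvNewArr (price_low : List Int) (compared_day : Int) : List Int :=
  let n : Int := price_low.length
  let s1 := (PySem.List.pyRange 0 compared_day 1).foldl
      (fun acc _ => pyg price_low 0 :: acc) []
  let s2 := (PySem.List.pyRange 0 n 1).foldl
      (fun acc i => pyg price_low i :: acc) s1
  ((PySem.List.pyRange 0 compared_day 1).foldl
      (fun acc _ => pyg price_low (n - 1) :: acc) s2).reverse

-- A's extreme-point loop: collect (extreme_low_point, extreme_low_point_index)
def pvPhase1A (price_low : List Int) (compared_day : Int) (nw : Array Int) :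
    List Int × List Int :=
  (PySem.List.pyRange 0 (price_low.length : Int) 1).foldl
    (fun (st : List Int × List Int) i =>
      if pvFlagLoop nw i compared_day (PySem.List.pyRange 0 (2 * compared_day + 1) 1) = 1
      then (st.1 ++ [pyg price_low i], st.2 ++ [i]) else st) ([], [])

-- A's rebound loop over the extreme points
def pvPhase2A (ext exti : List Int) (compared_day : Int) :
    Int × List Int × List Int × List Int × List Int :=
  (PySem.List.pyRange 0 ((ext.length : Int) - 1) 1).foldl
    (fun (st : Int × List Int × List Int × List Int × List Int) i =>
      let st1 := (1, st.2)
      if i < compared_day then st1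
      else pvInner2 ext exti i compared_day (PySem.List.pyRange 0 compared_day 1) st1)
    (1, [], [], [], [])

def get_extreme_low_point (price_low : List Int) (compared_day : Int) :
    List Int × List Int × List Int × List Int :=
  let nw := pvNewArr price_low compared_day
  let e := pvPhase1A price_low compared_day nw.toArray
  let r := pvPhase2A e.1 e.2 compared_day
  (r.2.1, r.2.2.1, r.2.2.2.1, r.2.2.2.2)

-- ===== PORT B =====
-- pref[i] = min over a[i - i % b : i + 1]  (per-block running minimum, left to right;
-- the loop carries (index, last value written) and builds the list reversed, then reverses once)
def pvPrefMins (b : Int) (a : List Int) (i0 prev0 : Int) : List Int :=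
  (a.foldl (fun (st : Int × Int × List Int) x =>
      let v := if PySem.Int.mod st.1 b = 0 then x else min st.2.1 x
      (st.1 + 1, v, v :: st.2.2)) (i0, prev0, [])).2.2.reverse

-- suf[i] = min over a[i : min(i - i % b + b, len a)]  (per-block running minimum, right to
-- left: the backward loop is a fold over the reversed list, consing each value on the front)
def pvSufMins (b : Int) (a : List Int) (i0 : Int) : List Int :=
  (a.reverse.foldl (fun (st : Int × List Int) x =>
      let v := match st.2 with
        | [] => x
        | y :: _ => if PySem.Int.mod st.1 b = b - 1 then x else min y x
      (st.1 - 1, v :: st.2)) (i0 + (a.length : Int) - 1, [])).2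

-- pad = [price_low[0]] * c + price_low + [price_low[-1]] * c
def pvPadB (price_low : List Int) (compared_day : Int) : List Int :=
  List.replicate compared_day.toNat (pyg price_low 0) ++ price_low ++
    List.replicate compared_day.toNat (pyg price_low (-1))

-- B's rebound loop: previous-c-window minimum from the block arrays, plus the rebound test
def pvPhase2B (ext extIdx : List Int) (c : Int) :
    List Int × List Int × List Int × List Int :=
  let pref2 := pvPrefMins c ext 0 0
  let suf2 := pvSufMins c ext 0
  (PySem.List.pyRange c ((ext.length : Int) - 1) 1).foldl
    (fun (st : List Int × List Int × List Int × List Int) i =>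
      if min (pyg suf2 (i - c)) (pyg pref2 (i - 1)) ≥ pyg ext i ∧ pyg ext (i + 1) > pyg ext i
      then (st.1 ++ [pyg ext i], st.2.1 ++ [pyg extIdx i],
            st.2.2.1 ++ [pyg ext (i + 1)], st.2.2.2 ++ [pyg extIdx (i + 1)])
      else st) ([], [], [], [])

def get_extreme_low_point_alt (price_low : List Int) (compared_day : Int) :
    List Int × List Int × List Int × List Int :=
  let n : Int := price_low.length
  let c := compared_day
  if c ≤ 0 ∨ n = 0 then ([], [], [], []) else
  let pad := pvPadB price_low c
  let w := 2 * c + 1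
  let pref := pvPrefMins w pad 0 0
  let suf := pvSufMins w pad 0
  let extIdx := (PySem.List.pyRange 0 n 1).filter
      (fun i => pyg price_low i ≤ min (pyg suf i) (pyg pref (i + 2 * c)))
  let ext := extIdx.map (fun i => pyg price_low i)
  pvPhase2B ext extIdx c

-- ===== PRECONDITION & SPEC =====
-- Pre_ excludes only the inputs on which A raises IndexError: an empty list with compared_day > 0.
def Pre_get_extreme_low_point (price_low : List Int) (compared_day : Int) : Prop :=
  price_low ≠ [] ∨ compared_day ≤ 0
instance (price_low : List Int) (compared_day : Int) : Decidable (Pre_get_extreme_low_point price_low compared_day) := by unfold Pre_get_extreme_low_point; infer_instance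
def pvWitness_get_extreme_low_point : List Int × Int := ([3, 1, 4, 0, 5, 2, 6], 1)

def Spec_get_extreme_low_point (price_low : List Int) (compared_day : Int) (out : List Int × List Int × List Int × List Int) : Prop := out = get_extreme_low_point_alt price_low compared_day
instance (price_low : List Int) (compared_day : Int) (out : List Int × List Int × List Int × List Int) : Decidable (Spec_get_extreme_low_point price_low compared_day out) := by unfold Spec_get_extreme_low_point; infer_instance

-- ===== CLAIM (what is proved, stated in full; the proofs are below) =====
def Claim_equal_get_extreme_low_point : Prop := ∀ (price_low : List Int) (compared_day : Int), Dom_get_extreme_low_point price_low compared_day → Pre_get_extreme_low_point price_low compared_day → Spec_get_extreme_low_point price_low compared_day (get_extreme_low_point price_low compared_day)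
-- ===== LEMMAS AND PROOFS =====

-- proof-side structural-recursion twins of the two fold-based block-minimum arrays
def pvPrefRec (b : Int) : List Int → Int → Int → List Int
  | [], _, _ => []
  | x :: xs, i, prev =>
    let v := if PySem.Int.mod i b = 0 then x else min prev x
    v :: pvPrefRec b xs (i + 1) v

def pvSufRec (b : Int) : List Int → Int → List Int
  | [], _ => []
  | x :: xs, i =>
    match pvSufRec b xs (i + 1) with
    | [] => [x]
    | y :: ys => (if PySem.Int.mod i b = b - 1 then x else min y x) :: y :: ys

theorem prefFold_eq (b : Int) : ∀ (a : List Int) (i prev : Int) (acc : List Int),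
    (a.foldl (fun (st : Int × Int × List Int) x =>
        let v := if PySem.Int.mod st.1 b = 0 then x else min st.2.1 x
        (st.1 + 1, v, v :: st.2.2)) (i, prev, acc)).2.2 =
      (pvPrefRec b a i prev).reverse ++ acc := by
  intro a
  induction a with
  | nil => intro i prev acc; simp [pvPrefRec]
  | cons x xs ih =>
    intro i prev acc
    simp only [List.foldl_cons, pvPrefRec]
    rw [ih]
    simp

theorem pvPrefMins_eq (b : Int) (a : List Int) (i prev : Int) :
    pvPrefMins b a i prev = pvPrefRec b a i prev := by
  rw [pvPrefMins, prefFold_eq]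
  simp

theorem sufFold_eq (b : Int) : ∀ (a : List Int) (i0 : Int),
    (a.reverse.foldl (fun (st : Int × List Int) x =>
        let v := match st.2 with
          | [] => x
          | y :: _ => if PySem.Int.mod st.1 b = b - 1 then x else min y x
        (st.1 - 1, v :: st.2)) (i0 + (a.length : Int) - 1, [])) =
      (i0 - 1, pvSufRec b a i0) := by
  intro a
  induction a with
  | nil => intro i0; simp [pvSufRec]
  | cons x xs ih =>
    intro i0
    have hrev : (x :: xs).reverse = xs.reverse ++ [x] := by simp
    rw [hrev, List.foldl_append]
    have hlen : i0 + ((x :: xs).length : Int) - 1 = (i0 + 1) + (xs.length : Int) - 1 := by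
      simp; ring
    rw [hlen, ih (i0 + 1)]
    simp only [List.foldl_cons, List.foldl_nil, pvSufRec]
    cases h : pvSufRec b xs (i0 + 1) <;> simp

theorem pvSufMins_eq (b : Int) (a : List Int) (i0 : Int) :
    pvSufMins b a i0 = pvSufRec b a i0 := by
  rw [pvSufMins, sufFold_eq]


theorem pvSufRec_length (b : Int) : ∀ (a : List Int) (i : Int),
    (pvSufRec b a i).length = a.length := by
  intro a
  induction a with
  | nil => intro i; rfl
  | cons x xs ih =>
    intro i
    simp only [pvSufRec]
    cases h : pvSufRec b xs (i + 1) with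
    | nil =>
      have := ih (i + 1); rw [h] at this; simp [← this]
    | cons y ys =>
      have := ih (i + 1); rw [h] at this; simp [← this]


theorem pvPrefRec_getD_zero (b : Int) (x : List Int) (i prev : Int) (h : x ≠ []) :
    (pvPrefRec b x i prev).getD 0 0 =
      if PySem.Int.mod i b = 0 then x.getD 0 0 else min prev (x.getD 0 0) := by
  cases x with
  | nil => exact absurd rfl h
  | cons a xs => simp [pvPrefRec]

theorem pvPrefRec_getD_succ (b : Int) : ∀ (a : List Int) (i prev : Int) (k : Nat),
    k + 1 < a.length →
    (pvPrefRec b a i prev).getD (k + 1) 0 =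
      if PySem.Int.mod (i + (k + 1 : Nat)) b = 0 then a.getD (k + 1) 0
      else min ((pvPrefRec b a i prev).getD k 0) (a.getD (k + 1) 0) := by
  intro a
  induction a with
  | nil => intro i prev k hk; simp at hk
  | cons x xs ih =>
    intro i prev k hk
    simp only [List.length_cons] at hk
    cases k with
    | zero =>
      have hxs : xs ≠ [] := by
        cases xs with
        | nil => simp at hk
        | cons _ _ => simp
      simp only [pvPrefRec, List.getD_cons_succ, List.getD_cons_zero]
      rw [pvPrefRec_getD_zero b xs (i + 1) _ hxs]
      norm_num
    | succ k' =>
      simp only [pvPrefRec, List.getD_cons_succ]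
      rw [ih (i + 1) _ k' (by omega)]
      have : (i + 1 + (↑k' + 1 : Nat)) = i + ((k' + 1 + 1 : Nat) : Int) := by push_cast; ring
      rw [this]

theorem pvSufRec_getD_zero (b : Int) (x : Int) (xs : List Int) (i : Int) :
    (pvSufRec b (x :: xs) i).getD 0 0 =
      if xs = [] then x
      else if PySem.Int.mod i b = b - 1 then x
      else min ((pvSufRec b xs (i + 1)).getD 0 0) x := by
  simp only [pvSufRec]
  cases h : pvSufRec b xs (i + 1) with
  | nil =>
    have := pvSufRec_length b xs (i + 1); rw [h] at this
    have hxs : xs = [] := by simpa using List.length_eq_zero_iff.mp this.symm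
    simp [hxs]
  | cons y ys =>
    have := pvSufRec_length b xs (i + 1); rw [h] at this
    have hxs : xs ≠ [] := by intro hh; rw [hh] at this; simp at this
    simp [hxs]

theorem pvSufRec_getD_succ (b : Int) (x : Int) (xs : List Int) (i : Int) (k : Nat) :
    (pvSufRec b (x :: xs) i).getD (k + 1) 0 = (pvSufRec b xs (i + 1)).getD k 0 := by
  simp only [pvSufRec]
  cases h : pvSufRec b xs (i + 1) with
  | nil => simp
  | cons y ys => simp

-- value at k of the prefix-minimum array: a lower bound on, and attained in, a[k - k%B .. k]
theorem pref_char (B : Nat) (hB : 0 < B) (a : List Int) : ∀ (k : Nat), k < a.length →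
    (∀ j : Nat, k - k % B ≤ j → j ≤ k → (pvPrefRec (B : Int) a 0 0).getD k 0 ≤ a.getD j 0) ∧
    (∃ j : Nat, k - k % B ≤ j ∧ j ≤ k ∧ (pvPrefRec (B : Int) a 0 0).getD k 0 = a.getD j 0) := by
  intro k
  induction k with
  | zero =>
    intro hk
    have hne : a ≠ [] := by intro h; rw [h] at hk; simp at hk
    rw [pvPrefRec_getD_zero _ _ _ _ hne]
    have : PySem.Int.mod 0 (B : Int) = 0 := by
      simpa using PySem.Int.mod_natCast 0 B
    rw [if_pos this]
    refine ⟨fun j h1 h2 => ?_, ⟨0, by omega, le_refl 0, rfl⟩⟩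
    have : j = 0 := by omega
    rw [this]
  | succ k ih =>
    intro hk
    have hrec := pvPrefRec_getD_succ (B : Int) a 0 0 k hk
    rw [zero_add] at hrec
    rw [PySem.Int.mod_natCast] at hrec
    by_cases hz : (k + 1) % B = 0
    · rw [hrec, if_pos (by exact_mod_cast hz)]
      constructor
      · intro j h1 h2
        have : j = k + 1 := by omega
        rw [this]
      · exact ⟨k + 1, by omega, le_refl _, rfl⟩
    · rw [hrec, if_neg (by exact_mod_cast hz)]
      have hk' : k < a.length := by omega
      obtain ⟨ihall, j0, hj1, hj2, hj3⟩ := ih hk'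
      have hB2 : 2 ≤ B := by
        rcases Nat.lt_or_ge B 2 with h | h
        · interval_cases B
          omega
        · exact h
      have hbs : k + 1 - (k + 1) % B = k - k % B := by
        have h1 : (k + 1) % B = (k % B + 1) % B := by
          conv_lhs => rw [Nat.add_mod]
          rw [Nat.mod_eq_of_lt (by omega : 1 < B)]
        have h2 : k % B < B := Nat.mod_lt _ hB
        have h3 : k % B + 1 < B := by
          rcases Nat.lt_or_ge (k % B + 1) B with h | h
          · exact h
          · have : k % B + 1 = B := by omega
            rw [h1, this, Nat.mod_self] at hz; omega
        rw [h1, Nat.mod_eq_of_lt h3]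
        omega
      rw [hbs]
      constructor
      · intro j h1 h2
        rcases Nat.lt_or_ge j (k + 1) with h | h
        · exact le_trans (min_le_left _ _) (ihall j h1 (by omega))
        · have : j = k + 1 := by omega
          rw [this]; exact min_le_right _ _
      · rcases min_cases ((pvPrefRec (B : Int) a 0 0).getD k 0) (a.getD (k + 1) 0) with
          ⟨hm, _⟩ | ⟨hm, _⟩
        · exact ⟨j0, hj1, by omega, by rw [hm, hj3]⟩
        · exact ⟨k + 1, by omega, le_refl _, hm⟩

-- value at k of the suffix-minimum array: lower bound on, and attained in, a[k .. block end ∧ last]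
theorem suf_char (B : Nat) (hB : 0 < B) : ∀ (a : List Int) (i0 : Nat) (k : Nat), k < a.length →
    (∀ j : Nat, k ≤ j → j ≤ min (k + (B - 1) - (i0 + k) % B) (a.length - 1) →
       (pvSufRec (B : Int) a (i0 : Int)).getD k 0 ≤ a.getD j 0) ∧
    (∃ j : Nat, k ≤ j ∧ j ≤ min (k + (B - 1) - (i0 + k) % B) (a.length - 1) ∧
       (pvSufRec (B : Int) a (i0 : Int)).getD k 0 = a.getD j 0) := by
  intro a
  induction a with
  | nil => intro i0 k hk; simp at hk
  | cons x xs ih =>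
    intro i0 k hk
    have hcast : ((i0 : Int) + 1) = ((i0 + 1 : Nat) : Int) := by push_cast; ring
    have hmodiff : ∀ m : Nat, (PySem.Int.mod (m : Int) (B : Int) = (B : Int) - 1) ↔ m % B = B - 1 := by
      intro m
      rw [PySem.Int.mod_natCast]
      constructor
      · intro h; omega
      · intro h; omega
    cases k with
    | zero =>
      rw [pvSufRec_getD_zero]
      simp only [Nat.add_zero]
      by_cases hxs : xs = []
      · rw [if_pos hxs]
        subst hxs
        refine ⟨fun j h1 h2 => ?_, ⟨0, le_refl _, by simp, rfl⟩⟩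
        simp at h2
        rw [h2]; simp
      · rw [if_neg hxs]
        have hlx : 0 < xs.length := List.length_pos_iff.mpr hxs
        by_cases hb : i0 % B = B - 1
        · rw [if_pos ((hmodiff i0).mpr hb)]
          refine ⟨fun j h1 h2 => ?_, ⟨0, le_refl _, by omega, rfl⟩⟩
          have : j = 0 := by omega
          rw [this]; simp
        · rw [if_neg (fun h => hb ((hmodiff i0).mp h)), hcast]
          obtain ⟨ihall, j0, hj1, hj2, hj3⟩ := ih (i0 + 1) 0 hlx
          have hm1 : i0 % B < B - 1 := by
            have := Nat.mod_lt i0 hB; omega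
          have hm2 : (i0 + 1) % B = i0 % B + 1 := by
            conv_lhs => rw [Nat.add_mod]
            rw [Nat.mod_eq_of_lt (by omega : 1 < B), Nat.mod_eq_of_lt (by omega : i0 % B + 1 < B)]
          have heq : min (0 + (B - 1) - i0 % B) ((x :: xs).length - 1)
              = min (0 + (B - 1) - (i0 + 1 + 0) % B) (xs.length - 1) + 1 := by
            simp only [List.length_cons, Nat.zero_add, Nat.add_zero]
            omega
          rw [heq]
          constructor
          · intro j h1 h2
            cases j with
            | zero => exact min_le_right _ _
            | succ j' =>
              rw [List.getD_cons_succ]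
              exact le_trans (min_le_left _ _) (ihall j' (by omega) (by omega))
          · rcases min_cases ((pvSufRec (B : Int) xs ((i0 + 1 : Nat) : Int)).getD 0 0) x with
              ⟨hm, _⟩ | ⟨hm, _⟩
            · exact ⟨j0 + 1, by omega, by omega, by rw [hm, hj3, List.getD_cons_succ]⟩
            · exact ⟨0, le_refl _, by omega, by rw [hm]; rfl⟩
    | succ k =>
      rw [pvSufRec_getD_succ, hcast]
      simp only [List.length_cons] at hk
      obtain ⟨ihall, j0, hj1, hj2, hj3⟩ := ih (i0 + 1) k (by omega)
      have hlx : 0 < xs.length := by omega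
      have hmlt : (i0 + 1 + k) % B < B := Nat.mod_lt _ hB
      have heq : min (k + 1 + (B - 1) - (i0 + (k + 1)) % B) ((x :: xs).length - 1)
          = min (k + (B - 1) - (i0 + 1 + k) % B) (xs.length - 1) + 1 := by
        simp only [List.length_cons]
        have : i0 + (k + 1) = i0 + 1 + k := by ring
        rw [this]
        omega
      rw [heq]
      constructor
      · intro j h1 h2
        cases j with
        | zero => omega
        | succ j' =>
          rw [List.getD_cons_succ]
          exact ihall j' (by omega) (by omega)
      · exact ⟨j0 + 1, by omega, by omega, by rw [hj3, List.getD_cons_succ]⟩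

-- a length-B window starting at l: x is ≤ the suffix/prefix-min pair iff x is ≤ every window element
theorem combine_iff (B : Nat) (hB : 0 < B) (a : List Int) (l r : Nat)
    (hr : r + 1 = l + B) (hlen : r < a.length) (x : Int) :
    (x ≤ min ((pvSufRec (B : Int) a 0).getD l 0) ((pvPrefRec (B : Int) a 0 0).getD r 0)) ↔
    (∀ j : Nat, l ≤ j → j ≤ r → x ≤ a.getD j 0) := by
  have hl : l < a.length := by omega
  have hsuf := suf_char B hB a 0 l hl
  simp only [Nat.cast_zero, Nat.zero_add] at hsuf
  obtain ⟨sall, js, hjs1, hjs2, hjs3⟩ := hsuf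
  obtain ⟨pall, jp, hjp1, hjp2, hjp3⟩ := pref_char B hB a r hlen
  have hd : l % B < B := Nat.mod_lt _ hB
  have hrm : r % B = (l % B + (B - 1)) % B := by
    have h2 : r = B * (l / B) + (l % B + (B - 1)) := by
      have := Nat.div_add_mod l B; omega
    rw [h2, Nat.mul_add_mod]
  have hrm' : (l % B = 0 → r % B = B - 1) ∧ (0 < l % B → r % B = l % B - 1) := by
    constructor
    · intro h0
      rw [hrm, h0, Nat.zero_add, Nat.mod_eq_of_lt (by omega)]
    · intro h0
      have h3 : l % B + (B - 1) = (l % B - 1) + B := by omega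
      rw [hrm, h3, Nat.add_mod_right, Nat.mod_eq_of_lt (by omega)]
  rw [le_min_iff]
  constructor
  · rintro ⟨hs, hp⟩ j h1 h2
    by_cases hcov : j ≤ min (l + (B - 1) - l % B) (a.length - 1)
    · exact le_trans hs (sall j h1 hcov)
    · refine le_trans hp (pall j ?_ h2)
      rcases Nat.eq_zero_or_pos (l % B) with h0 | h0
      · have := hrm'.1 h0; omega
      · have := hrm'.2 h0; omega
  · intro hall
    constructor
    · rw [hjs3]
      refine hall js hjs1 ?_
      omega
    · rw [hjp3]
      refine hall jp ?_ hjp2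
      rcases Nat.eq_zero_or_pos (l % B) with h0 | h0
      · have := hrm'.1 h0; omega
      · have := hrm'.2 h0; omega

theorem arr_getD (l : List Int) (n : Nat) : l.toArray.getD n 0 = l.getD n 0 := by
  rcases Nat.lt_or_ge n l.length with h | h
  · simp [Array.getD, h, List.getD_eq_getElem?_getD]
  · simp [Array.getD, Nat.not_lt.mpr h, List.getD_eq_getElem?_getD]

theorem pyga_eq (l : List Int) (i : Int) : pyga l.toArray i = pyg l i := by
  rw [pyga, pyg, PySem.List.pyGetD]
  rcases Int.lt_or_le i 0 with hi | hi
  · rw [if_neg (by omega)]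
    rcases Int.lt_or_le (i + (l.length : Int)) 0 with h2 | h2
    · rw [if_neg (by simpa using h2)]
      have hnone : PySem.List.pyGet? l i = none := by
        rw [PySem.List.pyGet?_eq_none_iff]
        simp [PySem.Raise.InRange]; omega
      rw [hnone]; rfl
    · rw [if_pos (by simpa using h2)]
      rw [PySem.List.pyGet?_neg l hi (by omega), arr_getD]
      have ht : (i + (l.toArray.size : Int)).toNat = l.length - (-i).toNat := by simp; omega
      rw [ht, List.getD_eq_getElem?_getD]
  · rw [if_pos hi, PySem.List.pyGet?_of_nonneg _ hi, arr_getD, List.getD_eq_getElem?_getD]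

theorem pvFlagLoop_eq_one_iff (nw : Array Int) (i c : Int) : ∀ (js : List Int),
    (pvFlagLoop nw i c js = 1 ↔ ∀ j ∈ js, pyga nw (i + c) ≤ pyga nw (i + j)) := by
  intro js
  induction js with
  | nil => simp [pvFlagLoop]
  | cons j js ih =>
    simp only [pvFlagLoop]
    by_cases h : pyga nw (i + c) > pyga nw (i + j)
    · rw [if_pos h]
      simp only [List.mem_cons]
      constructor
      · intro h0; omega
      · intro h0
        exact absurd (h0 j (Or.inl rfl)) (by omega)
    · rw [if_neg h, ih]
      simp only [List.mem_cons]
      constructor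
      · rintro h0 j' (rfl | hj')
        · omega
        · exact h0 j' hj'
      · intro h0 j' hj'
        exact h0 j' (Or.inr hj')

-- effect of A's inner rebound loop, entered at j0 with flag = j0 + 1
theorem pvInner2_spec (ext exti : List Int) (i c : Int) : ∀ (fuel : Nat) (j0 : Int),
    0 ≤ j0 → j0 < c → (c - j0).toNat = fuel →
    ∀ (L1 L2 L3 L4 : List Int),
    (pvInner2 ext exti i c (PySem.List.pyRange j0 c 1) (j0 + 1, L1, L2, L3, L4)).2 =
      if (∀ j : Int, j0 ≤ j → j < c → pyg ext i ≤ pyg ext (i - j - 1)) ∧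
          pyg ext i < pyg ext (i + 1) then
        (L1 ++ [pyg ext i], L2 ++ [pyg exti i], L3 ++ [pyg ext (i + 1)], L4 ++ [pyg exti (i + 1)])
      else (L1, L2, L3, L4) := by
  intro fuel
  induction fuel with
  | zero => intro j0 h0 h1 h2; omega
  | succ n ih =>
    intro j0 h0 h1 h2 L1 L2 L3 L4
    rw [PySem.List.pyRange_one_cons h1]
    simp only [pvInner2]
    by_cases hbr : pyg ext (i - j0 - 1) < pyg ext i
    · rw [if_pos hbr,
        if_neg (by rintro ⟨hall, -⟩; exact absurd (hall j0 (le_refl _) h1) (by omega))]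
    · rw [if_neg hbr]
      by_cases hlast : j0 + 1 = c
      · -- last iteration: flag' = j0 + 2 = c + 1
        have hflag : j0 + 1 + 1 = c + 1 := by omega
        have hemp : PySem.List.pyRange (j0 + 1) c 1 = [] := PySem.List.pyRange_one_eq_nil (by omega)
        rw [hemp]
        by_cases hreb : pyg ext (i + 1) > pyg ext i
        · rw [if_pos ⟨hflag, hreb⟩]
          simp only [pvInner2]
          have hall : ∀ j : Int, j0 ≤ j → j < c → pyg ext i ≤ pyg ext (i - j - 1) := by
            intro j hj1 hj2
            have hj : j = j0 := by omega
            rw [hj]; omega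
          rw [if_pos ⟨hall, hreb⟩]
        · rw [if_neg (by rintro ⟨-, h⟩; exact hreb h)]
          simp only [pvInner2]
          rw [if_neg (by rintro ⟨-, h⟩; exact hreb (by omega))]
      · -- middle iteration: flag' = j0 + 2 ≠ c + 1
        rw [if_neg (by rintro ⟨h, -⟩; omega)]
        have hih := ih (j0 + 1) (by omega) (by omega) (by omega) L1 L2 L3 L4
        rw [hih]
        by_cases hrest : (∀ j : Int, j0 + 1 ≤ j → j < c → pyg ext i ≤ pyg ext (i - j - 1)) ∧
            pyg ext i < pyg ext (i + 1)
        · rw [if_pos hrest, if_pos ?_]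
          refine ⟨fun j hj1 hj2 => ?_, hrest.2⟩
          rcases eq_or_lt_of_le hj1 with rfl | h
          · omega
          · exact hrest.1 j (by omega) hj2
        · rw [if_neg hrest, if_neg ?_]
          rintro ⟨hall, hreb⟩
          exact hrest ⟨fun j hj1 hj2 => hall j (by omega) hj2, hreb⟩

theorem pyg_nonneg (l : List Int) (i : Int) (h : 0 ≤ i) : pyg l i = l.getD i.toNat 0 := by
  rw [pyg, PySem.List.pyGetD, PySem.List.pyGet?_of_nonneg _ h, List.getD_eq_getElem?_getD]

theorem pyg_last (p : List Int) (h : p ≠ []) : pyg p ((p.length : Int) - 1) = pyg p (-1) := by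
  have h1 : 0 < p.length := List.length_pos_iff.mpr h
  rw [pyg_nonneg p _ (by omega), pyg, PySem.List.pyGetD, PySem.List.pyGet?_neg_one,
    List.getLast?_eq_getElem?, List.getD_eq_getElem?_getD]
  congr 2
  omega

theorem pad_center (p : List Int) (c i : Int) (x y : Int) (hc : 0 ≤ c) (h0 : 0 ≤ i)
    (h1 : i < p.length) :
    pyg (List.replicate c.toNat x ++ p ++ List.replicate c.toNat y) (i + c) = pyg p i := by
  rw [pyg_nonneg _ _ (by omega), pyg_nonneg _ _ h0, List.append_assoc,
    List.getD_eq_getElem?_getD, List.getD_eq_getElem?_getD,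
    List.getElem?_append_right (by simp; omega)]
  simp only [List.length_replicate]
  rw [List.getElem?_append_left (by omega)]
  congr 2
  omega

-- phase-1 condition equivalence: A's window scan vs B's block-minimum test
theorem cond1_iff (p : List Int) (c i : Int) (hc : 0 < c) (h0 : 0 ≤ i) (h1 : i < p.length)
    (x y : Int) :
    (pvFlagLoop (List.replicate c.toNat x ++ p ++ List.replicate c.toNat y).toArray i c
        (PySem.List.pyRange 0 (2 * c + 1) 1) = 1) ↔
    (pyg p i ≤
      min (pyg (pvSufRec (2 * c + 1) (List.replicate c.toNat x ++ p ++ List.replicate c.toNat y) 0) i)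
          (pyg (pvPrefRec (2 * c + 1) (List.replicate c.toNat x ++ p ++ List.replicate c.toNat y) 0 0) (i + 2 * c))) := by
  set pad := List.replicate c.toNat x ++ p ++ List.replicate c.toNat y with hpad
  have hlen : pad.length = c.toNat + p.length + c.toNat := by
    simp [hpad]; omega
  have hB : ((2 * c + 1).toNat : Int) = 2 * c + 1 := by omega
  have hsuf : pyg (pvSufRec (2 * c + 1) pad 0) i =
      (pvSufRec (((2 * c + 1).toNat : Nat) : Int) pad 0).getD i.toNat 0 := by
    rw [pyg_nonneg _ _ h0, hB]
  have hpref : pyg (pvPrefRec (2 * c + 1) pad 0 0) (i + 2 * c) =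
      (pvPrefRec (((2 * c + 1).toNat : Nat) : Int) pad 0 0).getD (i + 2 * c).toNat 0 := by
    rw [pyg_nonneg _ _ (by omega), hB]
  rw [hsuf, hpref]
  rw [combine_iff (2 * c + 1).toNat (by omega) pad i.toNat ((i + 2 * c).toNat)
    (by omega) (by omega)]
  rw [pvFlagLoop_eq_one_iff]
  simp only [pyga_eq]
  constructor
  · intro hall j hj1 hj2
    have hmem : ((j : Int) - i) ∈ PySem.List.pyRange 0 (2 * c + 1) 1 := by
      rw [PySem.List.mem_pyRange_one]; omega
    have := hall _ hmem
    have hc1 : i + ((j : Int) - i) = (j : Int) := by ring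
    rw [hc1] at this
    rw [← pad_center p c i x y (by omega) h0 h1]
    refine le_trans this ?_
    rw [pyg_nonneg _ _ (by omega)]
    have : ((j : Int)).toNat = j := by omega
    rw [this]
  · intro hall j hjmem
    rw [PySem.List.mem_pyRange_one] at hjmem
    have h2 := hall (i + j).toNat (by omega) (by omega)
    rw [← pad_center p c i x y (by omega) h0 h1] at h2
    refine le_trans h2 ?_
    rw [pyg_nonneg _ _ (by omega)]

-- phase-2 condition equivalence: A's backward scan over previous extremes vs B's block-minimum test
theorem cond2_iff (ext : List Int) (c i : Int) (hc : 0 < c) (hci : c ≤ i)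
    (him : i < (ext.length : Int) - 1) :
    ((∀ j : Int, 0 ≤ j → j < c → pyg ext i ≤ pyg ext (i - j - 1)) ∧
        pyg ext i < pyg ext (i + 1)) ↔
    (min (pyg (pvSufRec c ext 0) (i - c)) (pyg (pvPrefRec c ext 0 0) (i - 1)) ≥ pyg ext i ∧
        pyg ext (i + 1) > pyg ext i) := by
  have hB : ((c.toNat : Nat) : Int) = c := by omega
  apply and_congr _ Iff.rfl
  rw [ge_iff_le]
  have hsuf : pyg (pvSufRec c ext 0) (i - c) =
      (pvSufRec ((c.toNat : Nat) : Int) ext 0).getD (i - c).toNat 0 := by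
    rw [pyg_nonneg _ _ (by omega), hB]
  have hpref : pyg (pvPrefRec c ext 0 0) (i - 1) =
      (pvPrefRec ((c.toNat : Nat) : Int) ext 0 0).getD (i - 1).toNat 0 := by
    rw [pyg_nonneg _ _ (by omega), hB]
  rw [hsuf, hpref,
    combine_iff c.toNat (by omega) ext (i - c).toNat (i - 1).toNat (by omega) (by omega)]
  constructor
  · intro hall j hj1 hj2
    have h2 := hall (i - (j : Int) - 1) (by omega) (by omega)
    have he : i - (i - (j : Int) - 1) - 1 = (j : Int) := by ring
    rw [he, pyg_nonneg _ _ (by omega : (0:Int) ≤ (j : Int))] at h2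
    simpa using h2
  · intro hall j hj1 hj2
    have h2 := hall (i - j - 1).toNat (by omega) (by omega)
    rwa [pyg_nonneg _ (i - j - 1) (by omega)]

-- A's phase-1 loop: conditional append to the (values, indexes) pair is filter+map
theorem foldl_pair_append (C : Int → Prop) [DecidablePred C] (f : Int → Int) :
    ∀ (l : List Int) (acc : List Int × List Int),
    l.foldl (fun st i => if C i then (st.1 ++ [f i], st.2 ++ [i]) else st) acc =
      (acc.1 ++ (l.filter (fun i => decide (C i))).map f,
       acc.2 ++ l.filter (fun i => decide (C i))) := by
  intro l
  induction l with
  | nil => intro acc; simp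
  | cons x xs ih =>
    intro acc
    simp only [List.foldl_cons, List.filter_cons]
    by_cases h : C x
    · rw [if_pos h, ih]; simp [h]
    · rw [if_neg h, ih]; simp [h]

theorem foldl_snd_pres {γ : Type} (f : (Int × γ) → Int → (Int × γ)) :
    ∀ (js : List Int) (st : Int × γ),
      (∀ st' i, i ∈ js → (f st' i).2 = st'.2) → (js.foldl f st).2 = st.2 := by
  intro js
  induction js with
  | nil => intro st _; rfl
  | cons x xs ih =>
    intro st h
    rw [List.foldl_cons, ih _ (fun st' i hi => h st' i (List.mem_cons_of_mem _ hi)),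
      h st x (List.mem_cons_self)]

theorem foldl_snd_eq {γ : Type} (f : (Int × γ) → Int → (Int × γ)) (g : γ → Int → γ) :
    ∀ (js : List Int), (∀ st i, i ∈ js → (f st i).2 = g st.2 i) →
    ∀ st, (js.foldl f st).2 = js.foldl g st.2 := by
  intro js
  induction js with
  | nil => intro _ st; rfl
  | cons x xs ih =>
    intro h st
    rw [List.foldl_cons, List.foldl_cons,
      ih (fun st' i hi => h st' i (List.mem_cons_of_mem _ hi)) (f st x),
      h st x (List.mem_cons_self)]

theorem foldl_cons_map (f : Int → Int) : ∀ (l : List Int) (acc : List Int),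
    l.foldl (fun acc x => f x :: acc) acc = (l.map f).reverse ++ acc := by
  intro l
  induction l with
  | nil => intro acc; simp
  | cons x xs ih => intro acc; simp [ih]

theorem newArr_eq (p : List Int) (c : Int) (hpre : p ≠ [] ∨ c ≤ 0) :
    pvNewArr p c = pvPadB p c := by
  simp only [pvNewArr, pvPadB]
  rw [foldl_cons_map (fun _ => pyg p 0), foldl_cons_map (fun i => pyg p i),
    foldl_cons_map (fun _ => pyg p ((p.length : Int) - 1))]
  simp only [List.reverse_append, List.reverse_reverse, List.append_nil, List.append_assoc]
  rw [List.map_const', List.map_const', PySem.List.length_pyRange_one]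
  have hmid : (PySem.List.pyRange 0 (p.length : Int) 1).map (fun i => pyg p i) = p := by
    simp only [pyg]
    exact PySem.List.map_pyGetD_pyRange_zero p 0
  rw [hmid]
  rcases Int.lt_or_le 0 c with hc | hc
  · have hp : p ≠ [] := by
      rcases hpre with h | h
      · exact h
      · omega
    rw [pyg_last p hp]
    simp
  · simp [Int.toNat_of_nonpos, hc]

theorem phase1_eq (p : List Int) (c : Int) (hc : 0 < c) :
    pvPhase1A p c (pvPadB p c).toArray =
      (((PySem.List.pyRange 0 (p.length : Int) 1).filter
          (fun i => decide (pyg p i ≤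
            min (pyg (pvSufRec (2 * c + 1) (pvPadB p c) 0) i)
                (pyg (pvPrefRec (2 * c + 1) (pvPadB p c) 0 0) (i + 2 * c))))).map
          (fun i => pyg p i),
       (PySem.List.pyRange 0 (p.length : Int) 1).filter
          (fun i => decide (pyg p i ≤
            min (pyg (pvSufRec (2 * c + 1) (pvPadB p c) 0) i)
                (pyg (pvPrefRec (2 * c + 1) (pvPadB p c) 0 0) (i + 2 * c)))) ) := by
  rw [pvPhase1A,
    foldl_pair_append
      (fun i => pvFlagLoop (pvPadB p c).toArray i c (PySem.List.pyRange 0 (2 * c + 1) 1) = 1)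
      (fun i => pyg p i)]
  have hfil : (PySem.List.pyRange 0 (p.length : Int) 1).filter
        (fun i => decide (pvFlagLoop (pvPadB p c).toArray i c (PySem.List.pyRange 0 (2 * c + 1) 1) = 1)) =
      (PySem.List.pyRange 0 (p.length : Int) 1).filter
        (fun i => decide (pyg p i ≤
            min (pyg (pvSufRec (2 * c + 1) (pvPadB p c) 0) i)
                (pyg (pvPrefRec (2 * c + 1) (pvPadB p c) 0 0) (i + 2 * c)))) := by
    apply List.filter_congr
    intro i hi
    rw [PySem.List.mem_pyRange_one] at hi
    simp only [decide_eq_decide]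
    simp only [pvPadB]
    exact cond1_iff p c i hc hi.1 hi.2 (pyg p 0) (pyg p (-1))
  rw [hfil]
  simp

theorem phase2A_nonpos (ext exti : List Int) (c : Int) (hc : c ≤ 0) :
    (pvPhase2A ext exti c).2 = ([], [], [], []) := by
  rw [pvPhase2A]
  rw [foldl_snd_pres]
  intro st i _
  rw [PySem.List.pyRange_one_eq_nil hc]
  by_cases h : i < c
  · rw [if_pos h]
  · rw [if_neg h]; rfl

theorem phase2_eq (ext exti : List Int) (c : Int) (hc : 0 < c) :
    (pvPhase2A ext exti c).2 = pvPhase2B ext exti c := by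
  rw [pvPhase2A, pvPhase2B]
  simp only [pvPrefMins_eq, pvSufMins_eq]
  rcases Int.lt_or_le ((ext.length : Int) - 1) c with hm | hm
  · -- no index reaches the else-branch: both sides are empty
    rw [PySem.List.pyRange_one_eq_nil (by omega : (ext.length : Int) - 1 ≤ c), List.foldl_nil]
    rw [foldl_snd_pres]
    intro st i hi
    rw [PySem.List.mem_pyRange_one] at hi
    rw [if_pos (by omega : i < c)]
  · rw [PySem.List.pyRange_one_append 0 c ((ext.length : Int) - 1) (by omega) hm,
      List.foldl_append]
    have hskip := foldl_snd_pres
      (fun (st : Int × List Int × List Int × List Int × List Int) i =>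
        let st1 := (1, st.2)
        if i < c then st1
        else pvInner2 ext exti i c (PySem.List.pyRange 0 c 1) st1)
      (PySem.List.pyRange 0 c 1) (1, [], [], [], [])
      (by
        intro st' i hi
        rw [PySem.List.mem_pyRange_one] at hi
        simp only
        rw [if_pos (by omega : i < c)])
    rw [foldl_snd_eq _ _ _ ?_ _, hskip]
    intro st i hi
    rw [PySem.List.mem_pyRange_one] at hi
    rw [if_neg (by omega : ¬ i < c)]
    have hsp := pvInner2_spec ext exti i c (c - 0).toNat 0 (le_refl 0) hc rfl
      st.2.1 st.2.2.1 st.2.2.2.1 st.2.2.2.2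
    norm_num at hsp
    have heta : ((1 : Int), st.2) =
        ((1 : Int), st.2.1, st.2.2.1, st.2.2.2.1, st.2.2.2.2) := rfl
    rw [heta, hsp]
    by_cases hcond : (∀ j : Int, 0 ≤ j → j < c → pyg ext i ≤ pyg ext (i - j - 1)) ∧
        pyg ext i < pyg ext (i + 1)
    · rw [if_pos hcond,
        if_pos ((cond2_iff ext c i hc (by omega) (by omega)).mp hcond)]
    · rw [if_neg hcond,
        if_neg (fun h => hcond ((cond2_iff ext c i hc (by omega) (by omega)).mpr h))]

theorem main_eq (p : List Int) (c : Int) (hpre : p ≠ [] ∨ c ≤ 0) :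
    get_extreme_low_point p c = get_extreme_low_point_alt p c := by
  rcases Int.lt_or_le 0 c with hc | hc
  · have hp : p ≠ [] := by
      rcases hpre with h | h
      · exact h
      · omega
    have hn : p.length ≠ 0 := fun h => hp (List.length_eq_zero_iff.mp h)
    simp only [get_extreme_low_point, get_extreme_low_point_alt]
    rw [if_neg (by push Not; exact ⟨by omega, by exact_mod_cast hn⟩)]
    simp only [pvPrefMins_eq, pvSufMins_eq]
    rw [newArr_eq p c hpre, phase1_eq p c hc, phase2_eq _ _ _ hc]
  · simp only [get_extreme_low_point, get_extreme_low_point_alt]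
    rw [if_pos (Or.inl hc), phase2A_nonpos _ _ _ hc]

-- ===== VERDICT (by name: the statement is the Claim_ definition above) =====
theorem get_extreme_low_point_spec : Claim_equal_get_extreme_low_point := by
  intro p c _ hpre
  exact main_eq p c hpre
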